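-- pv_equiv track=rewrite | github.com/StarKnowData/trainee | PythonMath/数据结构与算法/DavidEppsteinPADS/pads/Graphs.py | isIndependentSet
-- ===== SOURCE A (Python) =====
-- def InducedSubgraph(V,G,adjacency_list_type=set):
--     """
--     The subgraph consisting of all edges between pairs of vertices in V.
--     """
--     return {x:adjacency_list_type(y for y in G[x] if y in V)
--             for x in G if x in V}
--
-- def isIndependentSet(V,G):
--     """
--     True if V is an independent set of vertices in G, False otherwise.
--     """
--     class NonIndependent(Exception):
--         pass
--
--     def TestIndependent(seq):
--         for x in seq:
--             raise NonIndependent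
--
--     try:
--         InducedSubgraph(V,G,TestIndependent)
--         return True
--     except NonIndependent:
--         return False
-- ===== SOURCE B (Python) =====
-- def isIndependentSet(V, G):
--     """
--     True if V is an independent set of vertices in G, False otherwise.
--     Staged set computation: collect the union of neighborhoods of the
--     V-vertices present in G, then test disjointness with V.
--     """
--     Vset = set(V)
--     nbrs = set()
--     for x in G:
--         if x in Vset:
--             nbrs.update(G[x])
--     return Vset.isdisjoint(nbrs)
-- ===== Notes on version B (the rewrite author's own statement) =====
-- stated objective: alternative
-- what changed: Replaces the induced-subgraph construction with a raising adjacency-constructor and try/except early abort by a staged set algorithm: hash V into a set, accumulate the full neighborhood set of the V-vertices of G in one pass, and decide the answer with a single final set-disjointness test (no early exit, no per-neighbor membership scan over the list V).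
import Mathlib
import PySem

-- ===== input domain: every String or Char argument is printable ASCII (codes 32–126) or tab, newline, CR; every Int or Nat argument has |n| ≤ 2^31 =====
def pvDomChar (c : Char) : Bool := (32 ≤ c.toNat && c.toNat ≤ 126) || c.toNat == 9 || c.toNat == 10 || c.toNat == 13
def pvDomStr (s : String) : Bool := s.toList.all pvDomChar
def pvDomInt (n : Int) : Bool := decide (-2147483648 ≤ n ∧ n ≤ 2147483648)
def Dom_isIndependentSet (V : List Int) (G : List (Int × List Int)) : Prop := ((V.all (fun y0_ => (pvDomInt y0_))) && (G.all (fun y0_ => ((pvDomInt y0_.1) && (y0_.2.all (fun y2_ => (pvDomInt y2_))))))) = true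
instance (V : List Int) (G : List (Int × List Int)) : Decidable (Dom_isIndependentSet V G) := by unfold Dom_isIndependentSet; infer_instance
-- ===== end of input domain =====

-- B replaces A's induced-subgraph + raising-constructor + try/except machinery by a staged set algorithm: accumulate the neighborhood set of V-vertices, then one disjointness test (alternative; no early exit).


-- ===== PORT A =====
-- TestIndependent: consuming the filtered adjacency generator raises NonIndependent
-- on the first element; modelled as Except Unit (error = the exception).
def testIndependent (seq : List Int) : Except Unit Unit :=
  match seq with
  | [] => Except.ok ()
  | _ :: _ => Except.error ()

-- InducedSubgraph(V, G, TestIndependent): the dict comprehension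
-- {x: TestIndependent(y for y in G[x] if y in V) for x in G if x in V},
-- built left to right, propagating the exception.
def inducedSubgraphT (V : List Int) : List (Int × List Int) → Except Unit (List (Int × Unit))
  | [] => Except.ok []
  | (x, adj) :: rest =>
    if V.contains x then
      match testIndependent (adj.filter (fun y => V.contains y)) with
      | Except.error e => Except.error e
      | Except.ok v =>
        match inducedSubgraphT V rest with
        | Except.error e => Except.error e
        | Except.ok d => Except.ok ((x, v) :: d)
    else inducedSubgraphT V rest

-- try: InducedSubgraph(V, G, TestIndependent); return True / except NonIndependent: return False
def isIndependentSet (V : List Int) (G : List (Int × List Int)) : Bool :=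
  match inducedSubgraphT V G with
  | Except.ok _ => true
  | Except.error _ => false

-- ===== PORT B =====
-- Vset = set(V); nbrs = set(); for x in G: if x in Vset: nbrs.update(G[x]); return Vset.isdisjoint(nbrs)
def isIndependentSet_alt (V : List Int) (G : List (Int × List Int)) : Bool :=
  let vset : PySem.Set Int := PySem.Set.ofList V
  let nbrs : PySem.Set Int :=
    G.foldl (fun acc p => if PySem.Set.contains vset p.1 then PySem.Set.update acc p.2 else acc)
      PySem.Set.empty
  PySem.Set.isdisjoint vset nbrs

-- ===== PRECONDITION & SPEC =====
def Spec_isIndependentSet (V : List Int) (G : List (Int × List Int)) (out : Bool) : Prop := out = isIndependentSet_alt V G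
instance (V : List Int) (G : List (Int × List Int)) (out : Bool) : Decidable (Spec_isIndependentSet V G out) := by unfold Spec_isIndependentSet; infer_instance

-- ===== CLAIM (what is proved, stated in full; the proofs are below) =====
def Claim_equal_isIndependentSet : Prop := ∀ (V : List Int) (G : List (Int × List Int)), Dom_isIndependentSet V G → Spec_isIndependentSet V G (isIndependentSet V G)

-- ===== LEMMAS AND PROOFS =====
-- The common characterisation: no vertex of V present in G has a neighbor in V.
def Indep (V : List Int) (G : List (Int × List Int)) : Prop :=
  ∀ p ∈ G, p.1 ∈ V → ∀ y ∈ p.2, y ∉ V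

theorem isIndependentSet_true_iff (V : List Int) (G : List (Int × List Int)) :
    isIndependentSet V G = true ↔ Indep V G := by
  induction G with
  | nil => simp [isIndependentSet, inducedSubgraphT, Indep]
  | cons p rest ih =>
    obtain ⟨x, adj⟩ := p
    simp only [isIndependentSet, inducedSubgraphT] at *
    by_cases hx : x ∈ V
    · rw [if_pos (by simpa using hx)]
      cases hfe : adj.filter (fun y => V.contains y) with
      | cons z zs =>
        simp only [testIndependent]
        constructor
        · intro h; exact absurd h (by simp)
        · intro h
          have hz : z ∈ adj.filter (fun y => V.contains y) := by rw [hfe]; simp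
          have := List.mem_filter.mp hz
          exact absurd (this.2) (by simpa using h (x, adj) (by simp) hx z this.1)
      | nil =>
        have hnone : ∀ y ∈ adj, y ∉ V := by
          intro y hy hyV
          have : y ∈ adj.filter (fun y => V.contains y) :=
            List.mem_filter.mpr ⟨hy, by simpa using hyV⟩
          rw [hfe] at this; simp at this
        simp only [testIndependent]
        constructor
        · intro h
          have hrest : (match inducedSubgraphT V rest with
              | Except.ok _ => true | Except.error _ => false) = true := by
            cases hr : inducedSubgraphT V rest with
            | ok d => rfl
            | error e => rw [hr] at h; simp at h
          intro q hq
          rcases List.mem_cons.mp hq with hq | hq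
          · subst hq; intro _ y hy; exact hnone y hy
          · exact ih.mp hrest q hq
        · intro h
          have hrest := ih.mpr (fun q hq => h q (List.mem_cons_of_mem _ hq))
          cases hr : inducedSubgraphT V rest with
          | ok d => rfl
          | error e => rw [hr] at hrest; simp at hrest
    · rw [if_neg (by simpa using hx)]
      rw [ih]
      constructor
      · intro h q hq
        rcases List.mem_cons.mp hq with hq | hq
        · subst hq; intro hxV; exact absurd hxV hx
        · exact h q hq
      · intro h q hq; exact h q (List.mem_cons_of_mem _ hq)

theorem mem_nbrs_iff (V : List Int) (G : List (Int × List Int)) (acc : PySem.Set Int) (y : Int) :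
    y ∈ G.foldl
        (fun acc p => if PySem.Set.contains (PySem.Set.ofList V) p.1 then PySem.Set.update acc p.2 else acc)
        acc
      ↔ y ∈ acc ∨ ∃ p ∈ G, p.1 ∈ V ∧ y ∈ p.2 := by
  induction G generalizing acc with
  | nil => simp
  | cons p rest ih =>
    simp only [List.foldl_cons]
    by_cases hp : p.1 ∈ V
    · rw [if_pos (by simpa [PySem.Set.contains_iff, PySem.Set.mem_ofList] using hp)]
      rw [ih]
      simp only [PySem.Set.mem_update, List.mem_cons]
      constructor
      · rintro ((h | h) | ⟨q, hq, h1, h2⟩)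
        · exact Or.inl h
        · exact Or.inr ⟨p, Or.inl rfl, hp, h⟩
        · exact Or.inr ⟨q, Or.inr hq, h1, h2⟩
      · rintro (h | ⟨q, (rfl | hq), h1, h2⟩)
        · exact Or.inl (Or.inl h)
        · exact Or.inl (Or.inr h2)
        · exact Or.inr ⟨q, hq, h1, h2⟩
    · rw [if_neg (by simpa [PySem.Set.contains_iff, PySem.Set.mem_ofList] using hp)]
      rw [ih]
      constructor
      · rintro (h | ⟨q, hq, h1, h2⟩)
        · exact Or.inl h
        · exact Or.inr ⟨q, List.mem_cons_of_mem _ hq, h1, h2⟩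
      · rintro (h | ⟨q, hq, h1, h2⟩)
        · exact Or.inl h
        · rcases List.mem_cons.mp hq with rfl | hq
          · exact absurd h1 hp
          · exact Or.inr ⟨q, hq, h1, h2⟩

theorem isIndependentSet_alt_true_iff (V : List Int) (G : List (Int × List Int)) :
    isIndependentSet_alt V G = true ↔ Indep V G := by
  unfold isIndependentSet_alt
  rw [PySem.Set.isdisjoint_iff]
  constructor
  · intro h p hp h1 y hy hyV
    exact h y (by simpa [PySem.Set.mem_ofList] using hyV)
      ((mem_nbrs_iff V G PySem.Set.empty y).mpr (Or.inr ⟨p, hp, h1, hy⟩))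
  · intro h y hyV hmem
    rcases (mem_nbrs_iff V G PySem.Set.empty y).mp hmem with h0 | ⟨p, hp, h1, h2⟩
    · simp [PySem.Set.empty] at h0
    · exact h p hp h1 y h2 (by simpa [PySem.Set.mem_ofList] using hyV)

-- ===== VERDICT (by name: the statement is the Claim_ definition above) =====
theorem isIndependentSet_spec : Claim_equal_isIndependentSet := by
  intro V G _
  unfold Spec_isIndependentSet
  rw [Bool.eq_iff_iff, isIndependentSet_true_iff, isIndependentSet_alt_true_iff]
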